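-- pv_equiv track=rewrite | github.com/asan-786/sso_app | backend/sso_helpers.py | normalize_scopes
-- ===== SOURCE A (Python) =====
-- from typing import List, Tuple, Optional
--
-- def normalize_scopes(scope_str: Optional[str]) -> List[str]:
--     if not scope_str:
--         return []
--     normalized = set()
--     for part in scope_str.replace(",", " ").split():
--         slug = part.strip().lower()
--         if slug:
--             normalized.add(slug)
--     return sorted(normalized)
-- ===== SOURCE B (Python) =====
-- from typing import List, Optional
--
-- def normalize_scopes(scope_str: Optional[str]) -> List[str]:
--     if not scope_str:
--         return []
--     tokens = sorted(part.lower() for part in scope_str.replace(",", " ").split())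
--     out: List[str] = []
--     for t in tokens:
--         if not out or out[-1] != t:
--             out.append(t)
--     return out
-- ===== Notes on version B (the rewrite author's own statement) =====
-- stated objective: alternative
-- what changed: Deduplication by hash-set before sorting is replaced by sorting the raw lowercased token list and removing duplicates in a single adjacency scan over the sorted list; the inert per-token strip() and emptiness guard are dropped since split() never yields empty or whitespace tokens.
import Mathlib
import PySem

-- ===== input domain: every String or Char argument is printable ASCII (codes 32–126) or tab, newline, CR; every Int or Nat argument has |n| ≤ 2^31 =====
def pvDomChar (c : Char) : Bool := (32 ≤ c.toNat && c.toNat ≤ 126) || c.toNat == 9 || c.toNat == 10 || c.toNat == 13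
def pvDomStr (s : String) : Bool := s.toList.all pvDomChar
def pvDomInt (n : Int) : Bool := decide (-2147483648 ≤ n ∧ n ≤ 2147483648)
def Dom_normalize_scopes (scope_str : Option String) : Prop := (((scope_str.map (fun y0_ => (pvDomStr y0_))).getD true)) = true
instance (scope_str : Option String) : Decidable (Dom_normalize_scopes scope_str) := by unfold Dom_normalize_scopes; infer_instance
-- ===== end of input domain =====

-- B replaces A's hash-set dedup-then-sort by sorting the raw lowercased token list and
-- removing duplicates in one adjacency scan over the sorted list (objective: alternative).

-- ===== PORT A =====
def normalize_scopes (scope_str : Option String) : List String :=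
  match scope_str with
  | none => []
  | some s =>
    if s = "" then []
    else
      let normalized : PySem.Set String :=
        (PySem.Str.split₀ (PySem.Str.replace s "," " ")).foldl
          (fun acc part =>
            let slug := PySem.Str.lower (PySem.Str.strip part)
            if slug ≠ "" then PySem.Set.add acc slug else acc)
          PySem.Set.empty
      PySem.List.sorted normalized (fun x => x)

-- ===== PORT B =====
def normalize_scopes_alt (scope_str : Option String) : List String :=
  match scope_str with
  | none => []
  | some s =>
    if s = "" then []
    else
      let tokens : List String :=
        PySem.List.sorted
          ((PySem.Str.split₀ (PySem.Str.replace s "," " ")).map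
            (fun part => PySem.Str.lower part))
          (fun x => x)
      tokens.foldl
        (fun out t =>
          if out = [] ∨ PySem.List.pyGet? out (-1) ≠ some t then out ++ [t] else out)
        []

-- ===== PRECONDITION & SPEC =====
def Spec_normalize_scopes (scope_str : Option String) (out : List String) : Prop := out = normalize_scopes_alt scope_str
instance (scope_str : Option String) (out : List String) : Decidable (Spec_normalize_scopes scope_str out) := by unfold Spec_normalize_scopes; infer_instance

-- ===== CLAIM (what is proved, stated in full; the proofs are below) =====
def Claim_equal_normalize_scopes : Prop := ∀ (scope_str : Option String), Dom_normalize_scopes scope_str → Spec_normalize_scopes scope_str (normalize_scopes scope_str)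

-- ===== LEMMAS AND PROOFS =====

-- Every token produced by Python's str.split() is nonempty and contains no whitespace.
theorem split0_go_tokens (cs : List Char) :
    ∀ (cur : List Char) (acc : List (List Char)),
      (∀ p ∈ acc, p ≠ [] ∧ ∀ c ∈ p, PySem.Chars.isspace c = false) →
      (∀ c ∈ cur, PySem.Chars.isspace c = false) →
      ∀ p ∈ PySem.Chars.split₀.go cs cur acc,
        p ≠ [] ∧ ∀ c ∈ p, PySem.Chars.isspace c = false := by
  induction cs with
  | nil =>
    intro cur acc hacc hcur p hp
    by_cases hc : cur.isEmpty
    · simp only [PySem.Chars.split₀.go, hc, if_pos, List.mem_reverse] at hp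
      exact hacc p hp
    · simp only [PySem.Chars.split₀.go, hc, if_neg, Bool.false_eq_true,
        not_false_iff, List.mem_reverse, List.mem_cons] at hp
      rcases hp with hp | hp
      · subst hp
        refine ⟨by simpa [List.isEmpty_iff] using hc, ?_⟩
        intro c hcmem; exact hcur c (List.mem_reverse.mp hcmem)
      · exact hacc p hp
  | cons c rest ih =>
    intro cur acc hacc hcur p hp
    by_cases hs : PySem.Chars.isspace c
    · by_cases hc : cur.isEmpty
      · simp only [PySem.Chars.split₀.go, hs, hc, if_pos] at hp
        exact ih [] acc hacc (by simp) p hp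
      · simp only [PySem.Chars.split₀.go, hs, hc, if_pos, Bool.false_eq_true, if_neg,
          not_false_iff] at hp
        refine ih [] (cur.reverse :: acc) ?_ (by simp) p hp
        intro q hq
        rcases List.mem_cons.mp hq with hq | hq
        · subst hq
          refine ⟨by simpa [List.isEmpty_iff] using hc, ?_⟩
          intro d hd; exact hcur d (List.mem_reverse.mp hd)
        · exact hacc q hq
    · simp only [PySem.Chars.split₀.go, hs, Bool.false_eq_true, if_neg, not_false_iff] at hp
      refine ih (c :: cur) acc hacc ?_ p hp
      intro d hd
      rcases List.mem_cons.mp hd with hd | hd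
      · subst hd; simpa using hs
      · exact hcur d hd

theorem split0_tokens (cs : List Char) :
    ∀ p ∈ PySem.Chars.split₀ cs, p ≠ [] ∧ ∀ c ∈ p, PySem.Chars.isspace c = false := by
  intro p hp
  exact split0_go_tokens cs [] [] (by simp) (by simp) p (by simpa [PySem.Chars.split₀] using hp)

theorem dropWhile_isspace_eq_self (l : List Char)
    (h : ∀ c ∈ l, PySem.Chars.isspace c = false) :
    l.dropWhile PySem.Chars.isspace = l := by
  cases l with
  | nil => rfl
  | cons c t => simp [h c (by simp)]

theorem strip_eq_self (p : List Char)
    (h : ∀ c ∈ p, PySem.Chars.isspace c = false) :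
    PySem.Chars.strip p = p := by
  unfold PySem.Chars.strip PySem.Chars.lstrip PySem.Chars.rstrip
  rw [dropWhile_isspace_eq_self p h,
    dropWhile_isspace_eq_self p.reverse (fun c hc => h c (List.mem_reverse.mp hc)),
    List.reverse_reverse]

-- the slug (lower ∘ strip) of a split() token is just its lowercasing, and it is nonempty
theorem slug_of_token (part : String)
    (hne : part.toList ≠ []) (hns : ∀ c ∈ part.toList, PySem.Chars.isspace c = false) :
    PySem.Str.lower (PySem.Str.strip part) = PySem.Str.lower part ∧
      PySem.Str.lower part ≠ "" := by
  constructor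
  · apply String.toList_inj.mp
    rw [PySem.Str.toList_lower, PySem.Str.toList_lower, PySem.Str.toList_strip,
      strip_eq_self _ hns]
  · intro h
    have h' := congrArg String.toList h
    rw [PySem.Str.toList_lower] at h'
    simp only [PySem.Chars.lower, String.toList_empty, List.map_eq_nil_iff] at h'
    exact hne h'

-- out[-1] is the last element
theorem pyGet_neg_one (acc : List String) :
    PySem.List.pyGet? acc (-1) = acc.getLast? := by
  cases acc with
  | nil => rfl
  | cons x t =>
    have h1 : ¬ ((0 : Int) ≤ -1) := by norm_num
    have h2 : -((x :: t).length : Int) ≤ -1 := by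
      simp only [List.length_cons]; omega
    simp only [PySem.List.pyGet?, PySem.List.pyIdx?, h1, h2, if_neg, if_pos,
      not_false_iff, Option.bind, List.getLast?_eq_getElem?]
    norm_num

theorem le_getLast_of_pairwise (l : List String) (g : String)
    (hp : l.Pairwise (· ≤ ·)) (hg : l.getLast? = some g) :
    ∀ a ∈ l, a ≤ g := by
  induction l with
  | nil => simp at hg
  | cons x t ih =>
    intro a ha
    cases t with
    | nil =>
      simp at hg ha
      simp [ha, hg]
    | cons y u =>
      rw [List.getLast?_cons_cons] at hg
      rcases List.mem_cons.mp ha with ha | ha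
      · subst ha
        have hgmem : g ∈ y :: u := List.mem_of_getLast? hg
        exact (List.pairwise_cons.mp hp).1 g hgmem
      · exact ih (List.pairwise_cons.mp hp).2 hg a ha

-- the adjacency-dedup fold: invariant over a sorted remainder
theorem adj_fold_spec (d : List String) :
    ∀ acc : List String,
      d.Pairwise (· ≤ ·) →
      acc.Pairwise (· < ·) →
      (∀ a ∈ acc, ∀ t ∈ d, a ≤ t) →
      (d.foldl
          (fun out t =>
            if out = [] ∨ PySem.List.pyGet? out (-1) ≠ some t then out ++ [t] else out)
          acc).Pairwise (· < ·) ∧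
        ∀ x, (x ∈ d.foldl
            (fun out t =>
              if out = [] ∨ PySem.List.pyGet? out (-1) ≠ some t then out ++ [t] else out)
            acc ↔ x ∈ acc ∨ x ∈ d) := by
  induction d with
  | nil => intro acc _ hacc _; simpa using hacc
  | cons t rest ih =>
    intro acc hd hacc hle
    have hdrest : rest.Pairwise (· ≤ ·) := (List.pairwise_cons.mp hd).2
    have htle : ∀ u ∈ rest, t ≤ u := (List.pairwise_cons.mp hd).1
    by_cases hcond : acc = [] ∨ PySem.List.pyGet? acc (-1) ≠ some t
    · -- append branch
      have hlt : ∀ a ∈ acc, a < t := by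
        intro a ha
        have hne : acc ≠ [] := by intro h; subst h; simp at ha
        rcases hcond with hnil | hlast
        · exact absurd hnil hne
        · have hg := List.getLast?_eq_some_getLast hne
          have hglast : acc.getLast hne ∈ acc := List.getLast_mem hne
          have hgle : acc.getLast hne ≤ t := hle _ hglast t (List.mem_cons_self)
          have hgne : acc.getLast hne ≠ t := by
            rw [pyGet_neg_one, hg] at hlast
            simpa using hlast
          have hag : a ≤ acc.getLast hne :=
            le_getLast_of_pairwise acc _ (hacc.imp le_of_lt) hg a ha
          exact lt_of_le_of_lt hag (lt_of_le_of_ne hgle hgne)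
      have hacc' : (acc ++ [t]).Pairwise (· < ·) := by
        rw [List.pairwise_append]
        refine ⟨hacc, List.pairwise_singleton _ _, ?_⟩
        intro a ha b hb
        rcases List.mem_singleton.mp hb with rfl
        exact hlt a ha
      have hle' : ∀ a ∈ acc ++ [t], ∀ u ∈ rest, a ≤ u := by
        intro a ha u hu
        rcases List.mem_append.mp ha with h | h
        · exact hle a h u (List.mem_cons_of_mem _ hu)
        · rcases List.mem_singleton.mp h with rfl
          exact htle u hu
      have hmain := ih (acc ++ [t]) hdrest hacc' hle'
      simp only [List.foldl_cons, if_pos hcond]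
      refine ⟨hmain.1, fun x => ?_⟩
      rw [hmain.2 x]
      simp only [List.mem_append, List.mem_cons]
      tauto
    · -- skip branch
      have hcond' := hcond
      rw [not_or, not_not] at hcond'
      obtain ⟨hne, hlast⟩ := hcond'
      rw [pyGet_neg_one] at hlast
      have htmem : t ∈ acc := List.mem_of_getLast? hlast
      have hmain := ih acc hdrest hacc (fun a ha u hu => hle a ha u (List.mem_cons_of_mem _ hu))
      simp only [List.foldl_cons, if_neg hcond]
      refine ⟨hmain.1, fun x => ?_⟩
      rw [hmain.2 x]
      simp only [List.mem_cons]
      constructor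
      · rintro (h | h)
        · exact Or.inl h
        · exact Or.inr (Or.inr h)
      · rintro (h | h | h)
        · exact Or.inl h
        · subst h; exact Or.inl htmem
        · exact Or.inr h

-- sorted(set(M)) equals the adjacency dedup of sorted(M)
theorem sorted_set_eq_adj (M : List String) :
    PySem.List.sorted (PySem.Set.ofList M) (fun x => x) =
      (PySem.List.sorted M (fun x => x)).foldl
        (fun out t =>
          if out = [] ∨ PySem.List.pyGet? out (-1) ≠ some t then out ++ [t] else out)
        [] := by
  have hd : (PySem.List.sorted M (fun x => x)).Pairwise (· ≤ ·) :=
    PySem.List.sorted_pairwise M (fun x => x)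
  have h := adj_fold_spec (PySem.List.sorted M (fun x => x)) [] hd (by simp) (by simp)
  have hnd : (List.foldl
      (fun out t =>
        if out = [] ∨ PySem.List.pyGet? out (-1) ≠ some t then out ++ [t] else out)
      [] (PySem.List.sorted M (fun x => x))).Nodup :=
    List.Pairwise.imp (fun hab => ne_of_lt hab) h.1
  refine PySem.List.sorted_eq_of_perm_of_pairwise_lt _ _ _ ?_ h.1
  refine (List.perm_ext_iff_of_nodup hnd (PySem.Set.nodup_ofList M)).mpr ?_
  intro a
  rw [h.2 a, PySem.Set.mem_ofList]
  simp [PySem.List.mem_sorted]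

-- A's set-building loop is Set.ofList of the lowercased tokens
theorem a_fold_eq_ofList (s : String) :
    (PySem.Str.split₀ (PySem.Str.replace s "," " ")).foldl
        (fun acc part =>
          let slug := PySem.Str.lower (PySem.Str.strip part)
          if slug ≠ "" then PySem.Set.add acc slug else acc)
        PySem.Set.empty =
      PySem.Set.ofList
        ((PySem.Str.split₀ (PySem.Str.replace s "," " ")).map
          (fun part => PySem.Str.lower part)) := by
  rw [PySem.List.foldl_congr_mem _ _
    (fun acc part => PySem.Set.add acc (PySem.Str.lower part)) _ ?_]
  · rw [← PySem.Set.update_map_eq_foldl_add]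
    exact PySem.Set.update_nil_left _
  · intro acc part hmem
    simp only [PySem.Str.split₀, List.mem_map] at hmem
    obtain ⟨p, hp, rfl⟩ := hmem
    obtain ⟨hpne, hpns⟩ := split0_tokens _ p hp
    have hne : (String.ofList p).toList ≠ [] := by
      rw [String.toList_ofList]; exact hpne
    have hns : ∀ c ∈ (String.ofList p).toList, PySem.Chars.isspace c = false := by
      rw [String.toList_ofList]; exact hpns
    obtain ⟨h1, h2⟩ := slug_of_token _ hne hns
    simp only [h1, if_pos h2]

-- ===== VERDICT (by name: the statement is the Claim_ definition above) =====
theorem normalize_scopes_spec : Claim_equal_normalize_scopes := by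
  intro scope_str _
  unfold Spec_normalize_scopes normalize_scopes normalize_scopes_alt
  cases scope_str with
  | none => rfl
  | some s =>
    by_cases hs : s = ""
    · simp [hs]
    · simp only [if_neg hs]
      rw [a_fold_eq_ofList s]
      exact sorted_set_eq_adj _
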